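-- pv_equiv track=rewrite | github.com/sharathb5/free-agents | app/repo_to_agent/internal_runner.py | _synthesize_repo_architect
-- ===== SOURCE A (Python) =====
-- from typing import Any, Dict, List, Optional
--
-- def _synthesize_repo_architect(
--     overview: Dict[str, Any],
--     tree: Dict[str, Any],
-- ) -> Dict[str, Any]:
--     """Build RepoArchitectureOutput from overview + tree tool results."""
--     hints = overview.get("hints") or {}
--     languages = hints.get("languages") or []
--     frameworks = hints.get("frameworks") or []
--     entries = tree.get("entries") or []
--     paths = [e.get("path") or "" for e in entries if e.get("path")]
--     # Deterministic derivation; TODO: replace with LLM when reasoning available.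
--     services: List[str] = []
--     if any("api" in p.lower() or "server" in p.lower() for p in paths):
--         services.append("api")
--     entrypoints: List[str] = []
--     for p in paths:
--         base = p.split("/")[-1].lower()
--         if base in ("main.py", "app.py", "index.js", "server.py"):
--             entrypoints.append(p)
--     # Ensure key structural signals are present even when the tree is large and we truncate.
--     # Some classifiers rely on seeing packaging + module/test structure markers.
--     paths_lower = [p.lower() for p in paths]
--     priority: List[str] = []
--     # Packaging/config files.
--     for fname in ("pyproject.toml", "setup.py", "setup.cfg", "requirements.txt", "package.json"):
--         if fname in paths_lower:
--             # Recover original casing/path from `paths` deterministically.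
--             priority.append(paths[paths_lower.index(fname)])
--     # Common structure directories.
--     for d in ("src/", "tests/", "test/", "docs/", "examples/"):
--         d_no = d.rstrip("/")
--         if any(p.startswith(d) for p in paths_lower) or any(p == d_no for p in paths_lower):
--             # Keep trailing slash so downstream heuristics match `startswith("tests/")`, etc.
--             priority.append(d)
--     # If there are any package initializers, surface a couple to prove module structure.
--     init_paths = [p for p in paths_lower if p.endswith("/__init__.py") or p.endswith("__init__.py")]
--     for p in init_paths[:5]:
--         priority.append(paths[paths_lower.index(p)])
--     # Also surface package directories (e.g. src/pvlib/) and a couple representative .py files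
--     # from src/ and tests/ so library repos aren't misrepresented as "setup.py only".
--     package_dirs: List[str] = []
--     for p in init_paths[:20]:
--         orig = paths[paths_lower.index(p)]
--         if "/__init__.py" in orig.lower():
--             pkg_dir = orig.rsplit("/__init__.py", 1)[0].rstrip("/") + "/"
--             package_dirs.append(pkg_dir)
--     for d in package_dirs[:5]:
--         priority.append(d)
--     src_py = [paths[i] for i, pl in enumerate(paths_lower) if pl.startswith("src/") and pl.endswith(".py")]
--     tests_py = [paths[i] for i, pl in enumerate(paths_lower) if (pl.startswith("tests/") or pl.startswith("test/")) and pl.endswith(".py")]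
--     for p in (src_py[:5] + tests_py[:5]):
--         priority.append(p)
--     # Build bounded key_paths with priority items first, then fill with tree paths.
--     key_paths_out: List[str] = []
--     seen: set[str] = set()
--     for p in priority:
--         pp = str(p).strip()
--         if pp and pp not in seen:
--             key_paths_out.append(pp)
--             seen.add(pp)
--     for p in paths:
--         pp = str(p).strip()
--         if pp and pp not in seen:
--             key_paths_out.append(pp)
--             seen.add(pp)
--         if len(key_paths_out) >= 120:
--             break
--     return {
--         "languages": languages,
--         "frameworks": frameworks,
--         "services": services,
--         "entrypoints": entrypoints[:10],
--         "integrations": [],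
--         # Keep more paths than the minimal stub; script-heavy repos need broader surface coverage.
--         # Still bounded to avoid huge payloads.
--         "key_paths": key_paths_out,
--     }
-- ===== SOURCE B (Python) =====
-- def _synthesize_repo_architect(overview, tree):
--     """One pass over the tree paths routes each path into per-category buckets
--     (first-original-by-lowercase dict, services flag, entrypoints, __init__ list,
--     src/tests .py files); the summary is then assembled from the buckets."""
--     hints = overview.get("hints") or {}
--     languages = hints.get("languages") or []
--     frameworks = hints.get("frameworks") or []
--     entries = tree.get("entries") or []
--     paths = [e.get("path") or "" for e in entries if e.get("path")]
--
--     PACK = ("pyproject.toml", "setup.py", "setup.cfg", "requirements.txt", "package.json")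
--     DIRS = ("src/", "tests/", "test/", "docs/", "examples/")
--
--     first_by_lower = {}  # lowercased path -> first original path with that lowercase
--     services_hit = False
--     entrypoints = []
--     init_lowers = []     # lowercased __init__.py paths, in order
--     src_py = []
--     tests_py = []
--     for p in paths:
--         pl = p.lower()
--         first_by_lower.setdefault(pl, p)
--         if "api" in pl or "server" in pl:
--             services_hit = True
--         if p.split("/")[-1].lower() in ("main.py", "app.py", "index.js", "server.py"):
--             entrypoints.append(p)
--         if pl.endswith("__init__.py"):
--             init_lowers.append(pl)
--         if pl.startswith("src/") and pl.endswith(".py"):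
--             src_py.append(p)
--         if (pl.startswith("tests/") or pl.startswith("test/")) and pl.endswith(".py"):
--             tests_py.append(p)
--
--     services = ["api"] if services_hit else []
--
--     priority = [first_by_lower[f] for f in PACK if f in first_by_lower]
--     priority += [d for d in DIRS
--                  if any(k.startswith(d) or k == d.rstrip("/") for k in first_by_lower)]
--     priority += [first_by_lower[pl] for pl in init_lowers[:5]]
--     package_dirs = []
--     for pl in init_lowers[:20]:
--         orig = first_by_lower[pl]
--         if "/__init__.py" in orig.lower():
--             package_dirs.append(orig.rsplit("/__init__.py", 1)[0].rstrip("/") + "/")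
--     priority += package_dirs[:5]
--     priority += src_py[:5] + tests_py[:5]
--
--     key_paths_out = []
--     seen = set()
--     for p in priority:
--         pp = p.strip()
--         if pp and pp not in seen:
--             key_paths_out.append(pp)
--             seen.add(pp)
--     for p in paths:
--         pp = p.strip()
--         if pp and pp not in seen:
--             key_paths_out.append(pp)
--             seen.add(pp)
--         if len(key_paths_out) >= 120:
--             break
--
--     return {
--         "languages": languages,
--         "frameworks": frameworks,
--         "services": services,
--         "entrypoints": entrypoints[:10],
--         "integrations": [],
--         "key_paths": key_paths_out,
--     }
-- ===== Notes on version B (the rewrite author's own statement) =====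
-- stated objective: alternative
-- what changed: Replaces A's dozen separate scans over paths/paths_lower (with paths_lower.index recovery of original casing) by a single bucketing pass that builds a first-original-by-lowercase dict plus per-category buckets, from which the priority list is assembled in A's category order.
import Mathlib
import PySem

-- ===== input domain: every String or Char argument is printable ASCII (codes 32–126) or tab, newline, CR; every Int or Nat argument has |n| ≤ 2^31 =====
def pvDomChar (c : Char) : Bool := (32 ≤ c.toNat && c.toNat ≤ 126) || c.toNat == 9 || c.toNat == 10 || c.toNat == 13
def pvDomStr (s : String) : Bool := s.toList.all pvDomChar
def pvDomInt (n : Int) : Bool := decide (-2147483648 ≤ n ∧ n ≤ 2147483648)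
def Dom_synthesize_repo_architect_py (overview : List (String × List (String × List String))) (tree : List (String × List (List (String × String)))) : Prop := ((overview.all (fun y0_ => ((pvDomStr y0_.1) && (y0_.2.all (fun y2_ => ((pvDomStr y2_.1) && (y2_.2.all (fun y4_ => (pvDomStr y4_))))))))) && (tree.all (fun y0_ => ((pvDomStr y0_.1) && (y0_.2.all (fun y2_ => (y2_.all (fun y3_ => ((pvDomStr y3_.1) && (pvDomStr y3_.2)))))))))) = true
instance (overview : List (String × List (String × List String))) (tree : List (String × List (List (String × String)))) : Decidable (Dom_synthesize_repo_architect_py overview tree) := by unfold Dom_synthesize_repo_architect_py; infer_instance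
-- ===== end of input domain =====

-- B replaces A's dozen separate scans (with paths_lower.index casing recovery) by one
-- bucketing pass over paths plus an assembly step; objective: alternative decomposition.


-- ===== SHARED HELPERS (Python text identical in A and B) =====

-- s.rstrip("/") — hand port (PySem has no rstrip-with-chars); exact: drops trailing '/' chars.
def rstripSlash (s : String) : String :=
  String.ofList ((s.toList.reverse.dropWhile (fun c => c == '/')).reverse)

-- orig.rsplit("/__init__.py", 1)[0].rstrip("/") + "/" — hand port of rsplit(sep, 1)[0]:
-- the part before the LAST occurrence of the separator (whole string when absent); exact.
def pkgDirOf (orig : String) : String :=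
  let j := PySem.Str.rfind orig "/__init__.py"
  let head := if j = -1 then orig else PySem.Str.slice orig none (some j)
  String.ofList ((rstripSlash head).toList ++ ['/'])

-- [e.get("path") or "" for e in entries if e.get("path")]   (truthy = some nonempty string)
def extractPaths (entries : List (List (String × String))) : List String :=
  (entries.filter (fun e => !(((PySem.Dict.mk e).get? "path").getD "" == ""))).map
    (fun e => ((PySem.Dict.mk e).get? "path").getD "")

-- p.split("/")[-1].lower() in ("main.py", "app.py", "index.js", "server.py")
-- (split with a nonempty separator never fails, [-1] of its nonempty result never fails)
def isEntrypoint (p : String) : Bool :=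
  let base := PySem.Str.lower (PySem.List.pyGetD ((PySem.Str.split? p "/").getD []) (-1) "")
  base == "main.py" || base == "app.py" || base == "index.js" || base == "server.py"

-- first key_paths loop: dedup-strip the priority list into (key_paths_out, seen)
def dedupPrio (priority : List String) : List String × PySem.Set String :=
  priority.foldl (fun st p =>
    let pp := PySem.Str.strip p
    if !(pp == "") && !(PySem.Set.contains st.2 pp) then (st.1 ++ [pp], PySem.Set.add st.2 pp)
    else st) ([], PySem.Set.empty)

-- second key_paths loop: fill from paths, break once len(out) >= 120 (checked after the append)
def fillPaths : List String → List String → PySem.Set String → List String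
  | [], out, _ => out
  | p :: rest, out, seen =>
    let pp := PySem.Str.strip p
    let st := if !(pp == "") && !(PySem.Set.contains seen pp) then (out ++ [pp], PySem.Set.add seen pp)
              else (out, seen)
    if 120 ≤ st.1.length then st.1 else fillPaths rest st.1 st.2

-- ===== PORT A =====
def synthesize_repo_architect_py (overview : List (String × List (String × List String))) (tree : List (String × List (List (String × String)))) : List (String × List String) :=
  let hints := ((PySem.Dict.mk overview).get? "hints").getD []
  let languages := ((PySem.Dict.mk hints).get? "languages").getD []
  let frameworks := ((PySem.Dict.mk hints).get? "frameworks").getD []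
  let entries := ((PySem.Dict.mk tree).get? "entries").getD []
  let paths := extractPaths entries
  let services : List String :=
    if paths.any (fun p => PySem.Str.isIn "api" (PySem.Str.lower p) || PySem.Str.isIn "server" (PySem.Str.lower p))
    then ["api"] else []
  let entrypoints := paths.foldl (fun acc p => if isEntrypoint p then acc ++ [p] else acc) []
  let paths_lower := paths.map PySem.Str.lower
  let priority : List String :=
    (["pyproject.toml", "setup.py", "setup.cfg", "requirements.txt", "package.json"] : List String).foldl
      (fun acc fname =>
        if paths_lower.contains fname then
          acc ++ [PySem.List.pyGetD paths (((PySem.List.index? paths_lower fname).getD 0 : Nat) : Int) ""]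
        else acc) []
  let priority :=
    (["src/", "tests/", "test/", "docs/", "examples/"] : List String).foldl
      (fun acc d =>
        let d_no := rstripSlash d
        if paths_lower.any (fun p => PySem.Str.startswith p d) || paths_lower.any (fun p => p == d_no)
        then acc ++ [d] else acc) priority
  let init_paths := paths_lower.filter
    (fun p => PySem.Str.endswith p "/__init__.py" || PySem.Str.endswith p "__init__.py")
  let priority := (PySem.List.slice init_paths none (some 5)).foldl
    (fun acc p =>
      acc ++ [PySem.List.pyGetD paths (((PySem.List.index? paths_lower p).getD 0 : Nat) : Int) ""]) priority
  let package_dirs := (PySem.List.slice init_paths none (some 20)).foldl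
    (fun acc p =>
      let orig := PySem.List.pyGetD paths (((PySem.List.index? paths_lower p).getD 0 : Nat) : Int) ""
      if PySem.Str.isIn "/__init__.py" (PySem.Str.lower orig) then acc ++ [pkgDirOf orig] else acc) []
  let priority := (PySem.List.slice package_dirs none (some 5)).foldl (fun acc d => acc ++ [d]) priority
  let src_py := ((PySem.List.enumerate paths_lower).filter
      (fun ipl => PySem.Str.startswith ipl.2 "src/" && PySem.Str.endswith ipl.2 ".py")).map
    (fun ipl => PySem.List.pyGetD paths ipl.1 "")
  let tests_py := ((PySem.List.enumerate paths_lower).filter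
      (fun ipl => (PySem.Str.startswith ipl.2 "tests/" || PySem.Str.startswith ipl.2 "test/") && PySem.Str.endswith ipl.2 ".py")).map
    (fun ipl => PySem.List.pyGetD paths ipl.1 "")
  let priority := ((PySem.List.slice src_py none (some 5)) ++ (PySem.List.slice tests_py none (some 5))).foldl
    (fun acc p => acc ++ [p]) priority
  let st := dedupPrio priority
  let key_paths_out := fillPaths paths st.1 st.2
  [("languages", languages), ("frameworks", frameworks), ("services", services),
   ("entrypoints", PySem.List.slice entrypoints none (some 10)), ("integrations", []),
   ("key_paths", key_paths_out)]

-- ===== PORT B =====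

-- the body of B's single bucketing loop; state =
-- (first_by_lower, (services_hit, (entrypoints, (init_lowers, (src_py, tests_py)))))
def bStep (st : PySem.Dict String String × (Bool × (List String × (List String × (List String × List String)))))
    (p : String) : PySem.Dict String String × (Bool × (List String × (List String × (List String × List String)))) :=
  let pl := PySem.Str.lower p
  (st.1.setdefault pl p,
   (if PySem.Str.isIn "api" pl || PySem.Str.isIn "server" pl then true else st.2.1,
    (if isEntrypoint p then st.2.2.1 ++ [p] else st.2.2.1,
     (if PySem.Str.endswith pl "__init__.py" then st.2.2.2.1 ++ [pl] else st.2.2.2.1,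
      (if PySem.Str.startswith pl "src/" && PySem.Str.endswith pl ".py" then st.2.2.2.2.1 ++ [p] else st.2.2.2.2.1,
       if (PySem.Str.startswith pl "tests/" || PySem.Str.startswith pl "test/") && PySem.Str.endswith pl ".py"
       then st.2.2.2.2.2 ++ [p] else st.2.2.2.2.2)))))

def synthesize_repo_architect_py_alt (overview : List (String × List (String × List String))) (tree : List (String × List (List (String × String)))) : List (String × List String) :=
  let hints := ((PySem.Dict.mk overview).get? "hints").getD []
  let languages := ((PySem.Dict.mk hints).get? "languages").getD []
  let frameworks := ((PySem.Dict.mk hints).get? "frameworks").getD []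
  let entries := ((PySem.Dict.mk tree).get? "entries").getD []
  let paths := extractPaths entries
  let st := paths.foldl bStep (PySem.Dict.empty, (false, ([], ([], ([], [])))))
  let firstBy := st.1
  let servicesHit := st.2.1
  let entrypoints := st.2.2.1
  let init_lowers := st.2.2.2.1
  let src_py := st.2.2.2.2.1
  let tests_py := st.2.2.2.2.2
  let services : List String := if servicesHit then ["api"] else []
  let priority : List String :=
    ((["pyproject.toml", "setup.py", "setup.cfg", "requirements.txt", "package.json"] : List String).filter
      (fun f => firstBy.contains f)).map (fun f => firstBy.getD f "")
  let priority := priority ++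
    (["src/", "tests/", "test/", "docs/", "examples/"] : List String).filter
      (fun d => (firstBy.keys).any (fun k => PySem.Str.startswith k d || k == rstripSlash d))
  let priority := priority ++
    (PySem.List.slice init_lowers none (some 5)).map (fun pl => firstBy.getD pl "")
  let package_dirs := (PySem.List.slice init_lowers none (some 20)).foldl
    (fun acc pl =>
      let orig := firstBy.getD pl ""
      if PySem.Str.isIn "/__init__.py" (PySem.Str.lower orig) then acc ++ [pkgDirOf orig] else acc) []
  let priority := priority ++ PySem.List.slice package_dirs none (some 5)
  let priority := priority ++
    (PySem.List.slice src_py none (some 5) ++ PySem.List.slice tests_py none (some 5))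
  let st2 := dedupPrio priority
  let key_paths_out := fillPaths paths st2.1 st2.2
  [("languages", languages), ("frameworks", frameworks), ("services", services),
   ("entrypoints", PySem.List.slice entrypoints none (some 10)), ("integrations", []),
   ("key_paths", key_paths_out)]

-- ===== PRECONDITION & SPEC =====
def Spec_synthesize_repo_architect_py (overview : List (String × List (String × List String))) (tree : List (String × List (List (String × String)))) (out : List (String × List String)) : Prop := out = synthesize_repo_architect_py_alt overview tree
instance (overview : List (String × List (String × List String))) (tree : List (String × List (List (String × String)))) (out : List (String × List String)) : Decidable (Spec_synthesize_repo_architect_py overview tree out) := by unfold Spec_synthesize_repo_architect_py; infer_instance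

-- ===== CLAIM (what is proved, stated in full; the proofs are below) =====
def Claim_equal_synthesize_repo_architect_py : Prop := ∀ (overview : List (String × List (String × List String))) (tree : List (String × List (List (String × String)))), Dom_synthesize_repo_architect_py overview tree → Spec_synthesize_repo_architect_py overview tree (synthesize_repo_architect_py overview tree)

-- ===== LEMMAS AND PROOFS =====

-- B's dict-building step, named for the proofs
def sdFold (d : PySem.Dict String String) (paths : List String) : PySem.Dict String String :=
  paths.foldl (fun d p => d.setdefault (PySem.Str.lower p) p) d

-- the six buckets of B's single pass, characterised one by one
theorem bPass_eq (paths : List String) :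
    ∀ (d : PySem.Dict String String) (b : Bool) (e i s t : List String),
    paths.foldl bStep (d, (b, (e, (i, (s, t))))) =
      (sdFold d paths,
       (b || paths.any (fun p => PySem.Str.isIn "api" (PySem.Str.lower p) || PySem.Str.isIn "server" (PySem.Str.lower p)),
        (e ++ paths.filter isEntrypoint,
         (i ++ (paths.filter (fun p => PySem.Str.endswith (PySem.Str.lower p) "__init__.py")).map PySem.Str.lower,
          (s ++ paths.filter (fun p => PySem.Str.startswith (PySem.Str.lower p) "src/" && PySem.Str.endswith (PySem.Str.lower p) ".py"),
           t ++ paths.filter (fun p => (PySem.Str.startswith (PySem.Str.lower p) "tests/" || PySem.Str.startswith (PySem.Str.lower p) "test/") && PySem.Str.endswith (PySem.Str.lower p) ".py")))))) := by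
  induction paths with
  | nil => intro d b e i s t; simp [sdFold]
  | cons p rest ih =>
    intro d b e i s t
    simp only [List.foldl_cons, bStep, ih, sdFold, List.any_cons, List.filter_cons]
    refine Prod.ext rfl (Prod.ext ?_ (Prod.ext ?_ (Prod.ext ?_ (Prod.ext ?_ ?_)))) <;>
      dsimp only <;> split_ifs with h <;> simp_all [List.append_assoc]

theorem sdFold_cons (d : PySem.Dict String String) (p : String) (rest : List String) :
    sdFold d (p :: rest) = sdFold (d.setdefault (PySem.Str.lower p) p) rest := rfl

theorem sdFold_contains (paths : List String) :
    ∀ (d : PySem.Dict String String) (k : String),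
    (sdFold d paths).contains k = (d.contains k || (paths.map PySem.Str.lower).contains k) := by
  induction paths with
  | nil => intro d k; simp [sdFold]
  | cons p rest ih =>
    intro d k
    rw [sdFold_cons, ih]
    rw [PySem.Dict.contains_setdefault]
    simp only [List.map_cons, List.contains_cons]
    cases (k == PySem.Str.lower p) <;> cases d.contains k <;> simp

theorem sdFold_get?_of_contains (paths : List String) :
    ∀ (d : PySem.Dict String String) (k : String), d.contains k = true →
    (sdFold d paths).get? k = d.get? k := by
  induction paths with
  | nil => intro d k _; simp [sdFold]
  | cons p rest ih =>
    intro d k hk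
    rw [sdFold_cons]
    by_cases h : k = PySem.Str.lower p
    · subst h
      rw [PySem.Dict.setdefault_of_contains d p hk]
      exact ih d _ hk
    · rw [ih _ k (by simp [PySem.Dict.contains_setdefault, hk]),
        PySem.Dict.get?_setdefault_of_ne d p h]

theorem sdFold_recover (paths : List String) :
    ∀ (d : PySem.Dict String String) (k : String), d.contains k = false →
    (paths.map PySem.Str.lower).contains k = true →
    (sdFold d paths).getD k "" =
      PySem.List.pyGetD paths (((PySem.List.index? (paths.map PySem.Str.lower) k).getD 0 : Nat) : Int) "" := by
  induction paths with
  | nil => intro d k _ h; simp at h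
  | cons p rest ih =>
    intro d k hd hk
    rw [sdFold_cons]
    simp only [PySem.List.index?, List.map_cons, List.idxOf?_cons]
    by_cases h : PySem.Str.lower p = k
    · subst h
      rw [PySem.Dict.setdefault_of_not_contains d p hd]
      rw [PySem.Dict.getD_eq_get?_getD,
        sdFold_get?_of_contains rest _ _ (PySem.Dict.contains_insert_self d _ p),
        PySem.Dict.get?_insert_self]
      simp
    · have hk' : (rest.map PySem.Str.lower).contains k = true := by
        simp only [List.map_cons, List.contains_cons] at hk
        rcases Bool.or_eq_true_iff.mp hk with h1 | h1
        · exact absurd (beq_iff_eq.mp h1).symm h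
        · exact h1
      have hd' : (d.setdefault (PySem.Str.lower p) p).contains k = false := by
        simp [PySem.Dict.contains_setdefault, hd, Ne.symm h]
      rw [ih _ k hd' hk']
      have hbeq : (PySem.Str.lower p == k) = false := by simp [h]
      simp only [hbeq, Bool.false_eq_true, if_false]
      obtain ⟨n, hn⟩ : ∃ n, List.idxOf? k (rest.map PySem.Str.lower) = some n := by
        cases hidx : List.idxOf? k (rest.map PySem.Str.lower) with
        | none => exact absurd (List.contains_iff_mem.mp hk') (List.idxOf?_eq_none_iff.mp hidx)
        | some n => exact ⟨n, rfl⟩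
      simp only [PySem.List.index?, hn, Option.map_some, Option.getD_some,
        PySem.List.pyGetD_natCast]
      simp

theorem any_or_split (l : List String) (f g : String → Bool) :
    (l.any fun x => f x || g x) = (l.any f || l.any g) := by
  induction l with
  | nil => rfl
  | cons a l ih => simp only [List.any_cons, ih]; cases f a <;> cases g a <;> simp

theorem sdFold_keys_any (paths : List String) :
    ∀ (d : PySem.Dict String String) (q : String → Bool),
    ((sdFold d paths).keys).any q = (d.keys.any q || (paths.map PySem.Str.lower).any q) := by
  induction paths with
  | nil => intro d q; simp [sdFold]
  | cons p rest ih =>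
    intro d q
    simp only [sdFold, List.foldl_cons] at *
    rw [ih]
    rw [PySem.Dict.keys_setdefault]
    by_cases h : d.contains (PySem.Str.lower p)
    · have hm : PySem.Str.lower p ∈ d.keys := (PySem.Dict.contains_iff_mem_keys d _).mp h
      simp only [h, if_true, List.map_cons, List.any_cons]
      cases hq : q (PySem.Str.lower p)
      · simp
      · simp [List.any_eq_true.mpr ⟨_, hm, hq⟩]
    · simp only [h, List.map_cons, List.any_cons]
      cases hb : d.keys.any q <;> cases hq : q (PySem.Str.lower p) <;>
        cases hr : (rest.map PySem.Str.lower).any q <;> simp [hb, hq]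

theorem endswith_absorb (s : String) :
    (PySem.Str.endswith s "/__init__.py" || PySem.Str.endswith s "__init__.py") =
      PySem.Str.endswith s "__init__.py" := by
  cases h : PySem.Str.endswith s "/__init__.py"
  · simp
  · have h1 : ("/__init__.py".toList) <:+ s.toList := by
      have := (PySem.Chars.endswith_iff s.toList "/__init__.py".toList).mp (by
        simpa using h)
      exact this
    have h2 : ("__init__.py".toList) <:+ s.toList :=
      List.IsSuffix.trans (by decide) h1
    have h3 : PySem.Str.endswith s "__init__.py" = true := by
      simpa using (PySem.Chars.endswith_iff s.toList "__init__.py".toList).mpr h2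
    simpa using h3

theorem enum_recover (q : String → Bool) (paths : List String) :
    ∀ (pre : List String),
    ((PySem.List.enumerate (paths.map PySem.Str.lower) (pre.length : Int)).filter (fun ip => q ip.2)).map
        (fun ip => PySem.List.pyGetD (pre ++ paths) ip.1 "") =
      paths.filter (fun p => q (PySem.Str.lower p)) := by
  induction paths with
  | nil => intro pre; simp
  | cons p rest ih =>
    intro pre
    have step : (pre.length : Int) + 1 = ((pre ++ [p]).length : Int) := by
      simp
    have tail : pre ++ p :: rest = (pre ++ [p]) ++ rest := by simp
    simp only [List.map_cons, PySem.List.enumerate, List.filter_cons]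
    rw [step]
    by_cases hq : q (PySem.Str.lower p)
    · simp only [hq, if_true, List.map_cons]
      rw [tail]
      rw [ih (pre ++ [p])]
      congr 1
      rw [PySem.List.pyGetD_natCast]
      simp [List.getD]
    · simp only [hq, Bool.false_eq_true, if_false]
      rw [tail, ih (pre ++ [p])]

-- ===== VERDICT (by name: the statement is the Claim_ definition above) =====
set_option maxHeartbeats 1000000 in
theorem synthesize_repo_architect_py_spec : Claim_equal_synthesize_repo_architect_py := by
  intro overview tree _
  unfold Spec_synthesize_repo_architect_py
  simp only [synthesize_repo_architect_py, synthesize_repo_architect_py_alt]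
  rw [bPass_eq]
  dsimp only
  generalize extractPaths (((PySem.Dict.mk tree).get? "entries").getD []) = paths
  -- B's dict queries become queries of paths_lower
  have hcont : ∀ f, (sdFold PySem.Dict.empty paths).contains f
      = (paths.map PySem.Str.lower).contains f := fun f => by
    rw [sdFold_contains]; simp [PySem.Dict.contains_empty]
  have hkeys : ∀ (q : String → Bool), ((sdFold PySem.Dict.empty paths).keys).any q
      = (paths.map PySem.Str.lower).any q := fun q => by
    rw [sdFold_keys_any]; simp [PySem.Dict.keys_empty]
  -- A's init_paths list is B's init_lowers bucket
  have hinit : (paths.map PySem.Str.lower).filter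
        (fun p => PySem.Str.endswith p "/__init__.py" || PySem.Str.endswith p "__init__.py")
      = (paths.filter (fun p => PySem.Str.endswith (PySem.Str.lower p) "__init__.py")).map PySem.Str.lower := by
    rw [List.filter_map]
    exact congrArg (List.map PySem.Str.lower)
      (List.filter_congr (fun x _ => endswith_absorb (PySem.Str.lower x)))
  -- loop shapes on both sides
  simp only [PySem.List.foldl_append_if_eq_filter, PySem.List.foldl_append_if,
    PySem.List.foldl_append_singleton_eq_map,
    List.map_id_fun', id_eq, List.nil_append, Bool.false_or, hcont, hkeys, ← hinit]
  -- dirs predicate: one any over an or-ed test vs two anys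
  have hsplit : ∀ d : String,
      ((paths.map PySem.Str.lower).any fun k => PySem.Str.startswith k d || k == rstripSlash d)
      = (((paths.map PySem.Str.lower).any fun p => PySem.Str.startswith p d)
         || ((paths.map PySem.Str.lower).any fun p => p == rstripSlash d)) :=
    fun d => any_or_split _ _ _
  simp only [hsplit]
  -- recover original casing: A's paths[paths_lower.index .] = B's dict value
  have hrec : ∀ x, (paths.map PySem.Str.lower).contains x = true →
      (sdFold PySem.Dict.empty paths).getD x ""
        = PySem.List.pyGetD paths
            (((PySem.List.index? (paths.map PySem.Str.lower) x).getD 0 : Nat) : Int) "" :=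
    fun x hx => sdFold_recover paths PySem.Dict.empty x (PySem.Dict.contains_empty x) hx
  have hmemInit : ∀ n (x : String), x ∈ PySem.List.slice ((paths.map PySem.Str.lower).filter
        (fun p => PySem.Str.endswith p "/__init__.py" || PySem.Str.endswith p "__init__.py")) none (some n)
      → (paths.map PySem.Str.lower).contains x = true := by
    intro n x hx
    exact List.contains_iff_mem.mpr (List.mem_filter.mp (PySem.List.mem_of_mem_slice _ _ _ hx)).1
  have hpack : List.map (fun x => (sdFold PySem.Dict.empty paths).getD x "")
        (List.filter (paths.map PySem.Str.lower).contains
          ["pyproject.toml", "setup.py", "setup.cfg", "requirements.txt", "package.json"])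
      = List.map (fun x => PySem.List.pyGetD paths
            (((PySem.List.index? (paths.map PySem.Str.lower) x).getD 0 : Nat) : Int) "")
        (List.filter (paths.map PySem.Str.lower).contains
          ["pyproject.toml", "setup.py", "setup.cfg", "requirements.txt", "package.json"]) :=
    List.map_congr_left (fun f hf => hrec f (List.mem_filter.mp hf).2)
  have hinit5 : (PySem.List.slice ((paths.map PySem.Str.lower).filter
        (fun p => PySem.Str.endswith p "/__init__.py" || PySem.Str.endswith p "__init__.py")) none (some 5)).map
          (fun pl => (sdFold PySem.Dict.empty paths).getD pl "")
      = (PySem.List.slice ((paths.map PySem.Str.lower).filter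
        (fun p => PySem.Str.endswith p "/__init__.py" || PySem.Str.endswith p "__init__.py")) none (some 5)).map
          (fun pl => PySem.List.pyGetD paths
            (((PySem.List.index? (paths.map PySem.Str.lower) pl).getD 0 : Nat) : Int) "") :=
    List.map_congr_left (fun x hx => hrec x (hmemInit 5 x hx))
  have hpkgF : List.filter (fun pl => PySem.Str.isIn "/__init__.py"
          (PySem.Str.lower ((sdFold PySem.Dict.empty paths).getD pl "")))
        (PySem.List.slice ((paths.map PySem.Str.lower).filter
          (fun p => PySem.Str.endswith p "/__init__.py" || PySem.Str.endswith p "__init__.py")) none (some 20))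
      = List.filter (fun pl => PySem.Str.isIn "/__init__.py"
          (PySem.Str.lower (PySem.List.pyGetD paths
            (((PySem.List.index? (paths.map PySem.Str.lower) pl).getD 0 : Nat) : Int) "")))
        (PySem.List.slice ((paths.map PySem.Str.lower).filter
          (fun p => PySem.Str.endswith p "/__init__.py" || PySem.Str.endswith p "__init__.py")) none (some 20)) :=
    List.filter_congr (fun x hx => by rw [hrec x (hmemInit 20 x hx)])
  have hpkgM : List.map (fun x => pkgDirOf ((sdFold PySem.Dict.empty paths).getD x ""))
        (List.filter (fun x => PySem.Str.isIn "/__init__.py"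
            (PySem.Str.lower (PySem.List.pyGetD paths
              (((PySem.List.index? (paths.map PySem.Str.lower) x).getD 0 : Nat) : Int) "")))
          (PySem.List.slice ((paths.map PySem.Str.lower).filter
            (fun p => PySem.Str.endswith p "/__init__.py" || PySem.Str.endswith p "__init__.py")) none (some 20)))
      = List.map (fun x => pkgDirOf (PySem.List.pyGetD paths
            (((PySem.List.index? (paths.map PySem.Str.lower) x).getD 0 : Nat) : Int) ""))
        (List.filter (fun x => PySem.Str.isIn "/__init__.py"
            (PySem.Str.lower (PySem.List.pyGetD paths
              (((PySem.List.index? (paths.map PySem.Str.lower) x).getD 0 : Nat) : Int) "")))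
          (PySem.List.slice ((paths.map PySem.Str.lower).filter
            (fun p => PySem.Str.endswith p "/__init__.py" || PySem.Str.endswith p "__init__.py")) none (some 20))) :=
    List.map_congr_left (fun x hx => by
      rw [hrec x (hmemInit 20 x (List.mem_filter.mp hx).1)])
  -- A's src_py / tests_py comprehensions over enumerate are plain filters of paths
  have hsrc : ((PySem.List.enumerate (paths.map PySem.Str.lower) 0).filter
        (fun ipl => PySem.Str.startswith ipl.2 "src/" && PySem.Str.endswith ipl.2 ".py")).map
          (fun ipl => PySem.List.pyGetD paths ipl.1 "")
      = paths.filter (fun p => PySem.Str.startswith (PySem.Str.lower p) "src/"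
          && PySem.Str.endswith (PySem.Str.lower p) ".py") := by
    simpa using enum_recover
      (fun x => PySem.Str.startswith x "src/" && PySem.Str.endswith x ".py") paths []
  have htst : ((PySem.List.enumerate (paths.map PySem.Str.lower) 0).filter
        (fun ipl => (PySem.Str.startswith ipl.2 "tests/" || PySem.Str.startswith ipl.2 "test/")
          && PySem.Str.endswith ipl.2 ".py")).map
          (fun ipl => PySem.List.pyGetD paths ipl.1 "")
      = paths.filter (fun p => (PySem.Str.startswith (PySem.Str.lower p) "tests/"
          || PySem.Str.startswith (PySem.Str.lower p) "test/")
          && PySem.Str.endswith (PySem.Str.lower p) ".py") := by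
    simpa using enum_recover
      (fun x => (PySem.Str.startswith x "tests/" || PySem.Str.startswith x "test/")
        && PySem.Str.endswith x ".py") paths []
  rw [hpack, hinit5, hpkgF, hpkgM, hsrc, htst]
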